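-- pv_equiv track=rewrite | github.com/riejohnson/gulf | text/prep_text.py | shuffle_ids
-- ===== SOURCE A (Python) =====
-- def shuffle_ids(dxs, ids, ids_top):
--    d_num = len(ids_top) - 1
--    new_ids_top = []
--    new_ids = []
--    for dx in dxs:
--       if dx < 0 or dx >= d_num:
--          raise IndexError
--       new_ids_top += [len(new_ids)]
--       new_ids += ids[ids_top[dx]:ids_top[dx+1]]
--    new_ids_top += [len(new_ids)]
--    return new_ids, new_ids_top
-- ===== SOURCE B (Python) =====
-- def shuffle_ids(dxs, ids, ids_top):
--     d_num = len(ids_top) - 1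
--     if any(dx < 0 or dx >= d_num for dx in dxs):
--         raise IndexError
--     segs = [ids[ids_top[dx]:ids_top[dx+1]] for dx in dxs]
--     total = 0
--     sums = []
--     for seg in segs:
--         total += len(seg)
--         sums.append(total)
--     new_ids_top = [0] + sums
--     new_ids = [x for seg in segs for x in seg]
--     return new_ids, new_ids_top
-- ===== Notes on version B (the rewrite author's own statement) =====
-- stated objective: alternative
-- what changed: Replaces A's single fused loop that tracks len(new_ids) inline with a guard pass, a list of segment slices, a prefix-sum pass for the offset table, and a flat concatenation for the ids.
import Mathlib
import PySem

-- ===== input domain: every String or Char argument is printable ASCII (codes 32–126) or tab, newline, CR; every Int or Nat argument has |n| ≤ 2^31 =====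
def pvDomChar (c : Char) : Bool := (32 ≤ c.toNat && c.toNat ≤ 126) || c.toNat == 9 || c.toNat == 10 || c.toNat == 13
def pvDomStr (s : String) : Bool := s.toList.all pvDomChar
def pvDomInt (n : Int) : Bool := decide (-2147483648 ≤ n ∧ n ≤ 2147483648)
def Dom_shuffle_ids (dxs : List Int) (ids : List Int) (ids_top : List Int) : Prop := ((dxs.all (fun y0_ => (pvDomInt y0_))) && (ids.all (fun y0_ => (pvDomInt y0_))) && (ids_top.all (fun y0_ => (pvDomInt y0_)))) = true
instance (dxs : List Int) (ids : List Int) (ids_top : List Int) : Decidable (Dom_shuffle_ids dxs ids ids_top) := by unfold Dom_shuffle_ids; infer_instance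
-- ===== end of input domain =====

-- B replaces A's single fused loop (tracking len(new_ids) inline) by a guard pass, slice collection, a prefix-sum pass and a flat concatenation (alternative decomposition, same cost).


-- shared accessor: the slice ids[ids_top[dx]:ids_top[dx+1]] (exact: both indexings are
-- in range under Pre_, and Python slicing never raises)
def pvSeg (ids ids_top : List Int) (dx : Int) : List Int :=
  PySem.List.slice ids (some (PySem.List.pyGetD ids_top dx 0)) (some (PySem.List.pyGetD ids_top (dx + 1) 0))

-- ===== PORT A =====
-- the fused for-loop of A; on a dx out of range Python raises IndexError (excluded by Pre_)
def shuffleLoop (ids ids_top : List Int) (d_num : Int) :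
    List Int → List Int × List Int → List Int × List Int
  | [], st => st
  | dx :: rest, (top, nids) =>
    if dx < 0 ∨ d_num ≤ dx then (top, nids)   -- Python: raise IndexError (outside Pre_)
    else shuffleLoop ids ids_top d_num rest
        (top ++ [(nids.length : Int)], nids ++ pvSeg ids ids_top dx)

def shuffle_ids (dxs : List Int) (ids : List Int) (ids_top : List Int) : List Int × List Int :=
  let d_num : Int := (ids_top.length : Int) - 1
  let st := shuffleLoop ids ids_top d_num dxs ([], [])
  (st.2, st.1 ++ [(st.2.length : Int)])

-- ===== PORT B =====
-- running-total pass of Source B (total += len(seg); sums.append(total))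
def prefixSums (total : Int) : List Int → List Int
  | [] => []
  | L :: rest => (total + L) :: prefixSums (total + L) rest

def shuffle_ids_alt (dxs : List Int) (ids : List Int) (ids_top : List Int) : List Int × List Int :=
  let d_num : Int := (ids_top.length : Int) - 1
  if dxs.any (fun dx => dx < 0 || d_num ≤ dx) then ([], [])  -- Python: raise IndexError (outside Pre_)
  else
    let segs := dxs.map (pvSeg ids ids_top)
    let sums := prefixSums 0 (segs.map (fun s => (s.length : Int)))
    let new_ids_top := [0] ++ sums
    let new_ids := segs.flatMap id
    (new_ids, new_ids_top)

-- ===== PRECONDITION & SPEC =====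
-- Pre_ excludes exactly the inputs on which A raises IndexError (some dx outside [0, len(ids_top)-1))
def Pre_shuffle_ids (dxs : List Int) (ids : List Int) (ids_top : List Int) : Prop :=
  ∀ dx ∈ dxs, 0 ≤ dx ∧ dx < (ids_top.length : Int) - 1

instance (dxs : List Int) (ids : List Int) (ids_top : List Int) : Decidable (Pre_shuffle_ids dxs ids ids_top) := by
  unfold Pre_shuffle_ids; infer_instance

def pvWitness_shuffle_ids : List Int × List Int × List Int := ([0, 1, 0], [5, 6, 7], [0, 2, 3])

def Spec_shuffle_ids (dxs : List Int) (ids : List Int) (ids_top : List Int) (out : List Int × List Int) : Prop := out = shuffle_ids_alt dxs ids ids_top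
instance (dxs : List Int) (ids : List Int) (ids_top : List Int) (out : List Int × List Int) : Decidable (Spec_shuffle_ids dxs ids ids_top out) := by unfold Spec_shuffle_ids; infer_instance

-- ===== CLAIM (what is proved, stated in full; the proofs are below) =====
def Claim_equal_shuffle_ids : Prop := ∀ (dxs : List Int) (ids : List Int) (ids_top : List Int), Dom_shuffle_ids dxs ids ids_top → Pre_shuffle_ids dxs ids ids_top → Spec_shuffle_ids dxs ids ids_top (shuffle_ids dxs ids ids_top)

-- ===== LEMMAS AND PROOFS =====

-- the list of values A appends to new_ids_top inside the loop (exclusive scan)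
def exScan (a : Int) : List Int → List Int
  | [] => []
  | L :: r => a :: exScan (a + L) r

theorem loop_eq (ids ids_top : List Int) (d_num : Int) :
    ∀ (dxs : List Int), (∀ dx ∈ dxs, 0 ≤ dx ∧ dx < d_num) → ∀ (top nids : List Int),
    shuffleLoop ids ids_top d_num dxs (top, nids) =
      (top ++ exScan (nids.length : Int) (dxs.map fun dx => ((pvSeg ids ids_top dx).length : Int)),
       nids ++ dxs.flatMap (pvSeg ids ids_top)) := by
  intro dxs
  induction dxs with
  | nil => intro _ top nids; simp [shuffleLoop, exScan]
  | cons dx rest ih =>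
    intro h top nids
    have hdx := h dx (by simp)
    rw [shuffleLoop]
    rw [if_neg (by omega)]
    rw [ih (fun d hd => h d (by simp [hd]))]
    simp [exScan, List.append_assoc]

theorem exScan_prefix (ls : List Int) : ∀ (a : Int),
    exScan a ls ++ [a + ls.sum] = a :: prefixSums a ls := by
  induction ls with
  | nil => intro a; simp [exScan, prefixSums]
  | cons L r ih =>
    intro a
    simp only [exScan, prefixSums, List.cons_append, List.sum_cons]
    have : a + (L + r.sum) = (a + L) + r.sum := by ring
    rw [this, ih (a + L)]

theorem flatMap_len (f : Int → List Int) (dxs : List Int) :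
    ((dxs.flatMap f).length : Int) = (dxs.map fun dx => ((f dx).length : Int)).sum := by
  induction dxs with
  | nil => simp
  | cons dx rest ih =>
    simp only [List.flatMap_cons, List.length_append, List.map_cons, List.sum_cons, Nat.cast_add, ih]

-- ===== VERDICT (by name: the statement is the Claim_ definition above) =====
theorem shuffle_ids_spec : Claim_equal_shuffle_ids := by
  intro dxs ids ids_top _ hpre
  unfold Spec_shuffle_ids shuffle_ids shuffle_ids_alt
  have hguard : (dxs.any fun dx => dx < 0 || (ids_top.length : Int) - 1 ≤ dx) = false := by
    rw [List.any_eq_false]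
    intro dx hdx hbad
    have h := hpre dx hdx
    simp only [Bool.or_eq_true, decide_eq_true_eq] at hbad
    omega
  simp only [hguard, if_false, Bool.false_eq_true]
  rw [loop_eq ids ids_top _ dxs hpre [] []]
  simp only [List.length_nil, Nat.cast_zero, List.nil_append, Prod.mk.injEq, List.map_map]
  constructor
  · rw [List.flatMap_map]
    rfl
  · rw [flatMap_len]
    have h2 := exScan_prefix (dxs.map fun dx => ((pvSeg ids ids_top dx).length : Int)) 0
    simp only [zero_add] at h2
    rw [h2]
    rfl
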